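-- pv_equiv track=rewrite | github.com/crabmustard/advent_2023 | daytwo/day2.py | check_draws_possible
-- ===== SOURCE A (Python) =====
-- red_cubes = 12
--
-- green_cubes = 13
--
-- blue_cubes = 14
--
-- def check_draws_possible(draw_list):
--     for hand in draw_list:
--         for grab in hand:
--             color, adder = grab[1], grab[0]
--             if color == 'red' and adder > red_cubes:
--                 return False
--             if color == 'blue' and adder > blue_cubes:
--                 return False
--             if color == 'green' and adder > green_cubes:
--                 return False
--
--
--     return True
-- ===== SOURCE B (Python) =====
-- red_cubes = 12
--
-- green_cubes = 13
--
-- blue_cubes = 14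
--
-- def check_draws_possible(draw_list):
--     # aggregate-first: one pass collecting the max seen per color, then validate
--     max_red = max_green = max_blue = 0
--     for hand in draw_list:
--         for adder, color in hand:
--             if color == 'red':
--                 max_red = max(max_red, adder)
--             elif color == 'green':
--                 max_green = max(max_green, adder)
--             elif color == 'blue':
--                 max_blue = max(max_blue, adder)
--     return max_red <= red_cubes and max_green <= green_cubes and max_blue <= blue_cubes
-- ===== Notes on version B (the rewrite author's own statement) =====
-- stated objective: alternative
-- what changed: Replaced A's interleaved per-grab limit checks with early return by a single aggregate pass that accumulates the maximum count per color and validates the three maxima against the limits at the end.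
import Mathlib
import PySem

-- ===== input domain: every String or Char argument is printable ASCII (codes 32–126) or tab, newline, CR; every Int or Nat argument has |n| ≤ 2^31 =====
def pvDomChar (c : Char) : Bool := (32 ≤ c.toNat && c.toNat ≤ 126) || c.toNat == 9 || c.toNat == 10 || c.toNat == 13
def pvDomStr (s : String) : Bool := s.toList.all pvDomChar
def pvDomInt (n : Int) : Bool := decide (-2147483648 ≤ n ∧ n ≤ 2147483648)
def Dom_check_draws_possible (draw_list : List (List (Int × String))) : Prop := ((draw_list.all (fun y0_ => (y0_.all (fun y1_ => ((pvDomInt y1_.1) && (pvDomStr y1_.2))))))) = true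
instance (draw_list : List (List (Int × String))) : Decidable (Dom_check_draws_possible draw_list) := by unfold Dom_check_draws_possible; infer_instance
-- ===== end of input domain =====

-- B replaces A's interleaved early-exit checks by one aggregate pass (max per color), then validates.
-- ===== PORT A =====
def pvLoopGrabs : List (Int × String) → Bool
  | [] => true
  | grab :: rest =>
    let color := grab.2
    let adder := grab.1
    if color == "red" && adder > 12 then false
    else if color == "blue" && adder > 14 then false
    else if color == "green" && adder > 13 then false
    else pvLoopGrabs rest

def pvLoopHands : List (List (Int × String)) → Bool
  | [] => true
  | hand :: rest => if pvLoopGrabs hand then pvLoopHands rest else false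

def check_draws_possible (draw_list : List (List (Int × String))) : Bool :=
  pvLoopHands draw_list

-- ===== PORT B =====
def pvMaxStep (s : Int × Int × Int) (g : Int × String) : Int × Int × Int :=
  if g.2 == "red" then (max s.1 g.1, s.2.1, s.2.2)
  else if g.2 == "green" then (s.1, max s.2.1 g.1, s.2.2)
  else if g.2 == "blue" then (s.1, s.2.1, max s.2.2 g.1)
  else s

def check_draws_possible_alt (draw_list : List (List (Int × String))) : Bool :=
  let s := draw_list.foldl (fun s hand => hand.foldl pvMaxStep s) ((0 : Int), (0 : Int), (0 : Int))
  decide (s.1 ≤ 12) && decide (s.2.1 ≤ 13) && decide (s.2.2 ≤ 14)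

-- ===== PRECONDITION & SPEC =====
def Spec_check_draws_possible (draw_list : List (List (Int × String))) (out : Bool) : Prop := out = check_draws_possible_alt draw_list
instance (draw_list : List (List (Int × String))) (out : Bool) : Decidable (Spec_check_draws_possible draw_list out) := by unfold Spec_check_draws_possible; infer_instance

-- ===== CLAIM (what is proved, stated in full; the proofs are below) =====
def Claim_equal_check_draws_possible : Prop := ∀ (draw_list : List (List (Int × String))), Dom_check_draws_possible draw_list → Spec_check_draws_possible draw_list (check_draws_possible draw_list)

-- ===== LEMMAS AND PROOFS =====

def pvCheck3 (s : Int × Int × Int) : Bool :=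
  decide (s.1 ≤ 12) && decide (s.2.1 ≤ 13) && decide (s.2.2 ≤ 14)

def pvOkGrab (g : Int × String) : Bool :=
  !(g.2 == "red" && g.1 > 12) && !(g.2 == "blue" && g.1 > 14) && !(g.2 == "green" && g.1 > 13)

theorem pvCheck3_step (s : Int × Int × Int) (g : Int × String) :
    pvCheck3 (pvMaxStep s g) = (pvCheck3 s && pvOkGrab g) := by
  simp only [pvMaxStep, pvOkGrab, pvCheck3]
  by_cases h1 : g.2 = "red" <;> by_cases h2 : g.2 = "green" <;> by_cases h3 : g.2 = "blue" <;>
    simp only [Bool.beq_eq_decide_eq] <;>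
    simp [h1, h2, h3, beq_iff_eq, max_le_iff, Bool.and_assoc, Bool.and_comm, Bool.and_left_comm, ← decide_not, not_lt]

theorem pvCheck3_foldl_hand (h : List (Int × String)) (s : Int × Int × Int) :
    pvCheck3 (h.foldl pvMaxStep s) = (pvCheck3 s && h.all pvOkGrab) := by
  induction h generalizing s with
  | nil => simp
  | cons g t ih => simp [List.foldl, ih, pvCheck3_step, Bool.and_assoc]

theorem pvCheck3_foldl (dl : List (List (Int × String))) (s : Int × Int × Int) :
    pvCheck3 (dl.foldl (fun s hand => hand.foldl pvMaxStep s) s) =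
      (pvCheck3 s && dl.all (fun h => h.all pvOkGrab)) := by
  induction dl generalizing s with
  | nil => simp
  | cons h t ih => simp [List.foldl, ih, pvCheck3_foldl_hand, Bool.and_assoc]

theorem pvLoopGrabs_all (h : List (Int × String)) : pvLoopGrabs h = h.all pvOkGrab := by
  induction h with
  | nil => rfl
  | cons g t ih =>
    simp only [pvLoopGrabs, pvOkGrab, List.all_cons, ih]
    split_ifs with c1 c2 c3 <;> simp_all <;> tauto
  
theorem pvLoopHands_all (dl : List (List (Int × String))) :
    pvLoopHands dl = dl.all (fun h => h.all pvOkGrab) := by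
  induction dl with
  | nil => rfl
  | cons h t ih => simp [pvLoopHands, pvLoopGrabs_all, ih]

-- ===== VERDICT (by name: the statement is the Claim_ definition above) =====
theorem check_draws_possible_spec : Claim_equal_check_draws_possible := by
  intro dl _
  show check_draws_possible dl = check_draws_possible_alt dl
  have : check_draws_possible_alt dl =
      pvCheck3 (dl.foldl (fun s hand => hand.foldl pvMaxStep s) ((0:Int),(0:Int),(0:Int))) := rfl
  rw [check_draws_possible, pvLoopHands_all, this, pvCheck3_foldl]
  simp [pvCheck3]
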